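-- pv_equiv track=rewrite | github.com/Zelaxel/AP | Ejercicios_de_practicas/4.Monedas (greedy)/solve.py | solve
-- ===== SOURCE A (Python) =====
-- def solve(coins, change):
--
--     sorted_coins = coins.copy()
--     sorted_coins.sort(reverse=True)
--     taken = []
--
--     total = 0
--     for coin in sorted_coins:
--
--         index = None
--         for i in range(len(coins)):
--             if coins[i] == coin and (i + 1) not in taken:
--                 index = i
--
--         if total + coin <= change:
--             total += coin
--             taken.append(index + 1)
--
--         if total == change:
--             taken.sort()
--             return taken
--
--     return None
-- ===== SOURCE B (Python) =====
-- def solve(coins, change):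
--     # Decorate-sort once: (value, index) pairs ascending; walking them in reverse
--     # yields values descending with the LARGEST index first among equal values,
--     # which is exactly the index A's O(n) rescan picks each iteration.
--     pairs = sorted((v, i) for i, v in enumerate(coins))
--     taken = []
--     total = 0
--     for v, i in reversed(pairs):
--         if total + v <= change:
--             if total + v == change:
--                 return sorted(taken + [i + 1])
--             taken.append(i + 1)
--             total += v
--         elif total == change:
--             return sorted(taken)
--     return None
-- ===== Notes on version B (the rewrite author's own statement) =====
-- stated objective: faster
-- what changed: A rescans the whole coin list on every iteration to find the largest unused position of the current value; B sorts (value, index) pairs once and walks them in reverse, so each iteration is O(1) with no inner scan.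
import Mathlib
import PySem

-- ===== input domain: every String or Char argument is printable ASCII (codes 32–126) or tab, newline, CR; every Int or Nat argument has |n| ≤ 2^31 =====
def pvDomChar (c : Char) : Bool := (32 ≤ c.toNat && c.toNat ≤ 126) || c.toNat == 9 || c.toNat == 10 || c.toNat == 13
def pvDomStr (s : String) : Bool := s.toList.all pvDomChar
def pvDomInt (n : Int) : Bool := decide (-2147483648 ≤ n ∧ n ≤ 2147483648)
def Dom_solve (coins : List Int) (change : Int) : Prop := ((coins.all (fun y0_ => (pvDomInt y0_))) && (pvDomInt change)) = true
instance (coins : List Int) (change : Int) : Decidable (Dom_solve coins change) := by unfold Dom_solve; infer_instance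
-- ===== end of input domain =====

-- B replaces A's per-iteration rescan of the coin list by one decorate-sort of
-- (value, index) pairs walked in reverse: O(n log n) instead of O(n^2), same results.


-- ===== PORT A =====
-- the inner `for i in range(len(coins)): if coins[i] == coin and (i+1) not in taken: index = i`
def solveScan (coins : List Int) (coin : Int) (taken : List Int) : Option Int :=
  (List.range coins.length).foldl
    (fun index i =>
      if coins.getD i 0 = coin ∧ ((i : Int) + 1) ∉ taken then some (i : Int) else index)
    none

-- the outer `for coin in sorted_coins` loop with state (taken, total)
def solveLoop (coins : List Int) (change : Int) :
    List Int → List Int → Int → Option (List Int)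
  | [], _, _ => none
  | coin :: rest, taken, total =>
    let index := solveScan coins coin taken
    -- `index` is provably `some _` whenever the branch below uses it (an unused matching
    -- position always exists there); Python would raise TypeError were it None.
    let taken' := if total + coin ≤ change then taken ++ [index.getD 0 + 1] else taken
    let total' := if total + coin ≤ change then total + coin else total
    if total' = change then some (PySem.List.sorted taken' (fun x => x))
    else solveLoop coins change rest taken' total'

def solve (coins : List Int) (change : Int) : Option (List Int) :=
  solveLoop coins change (PySem.List.sorted coins (fun x => x) true) [] 0

-- ===== PORT B =====
-- `sorted((v, i) for i, v in enumerate(coins))`; Python tuple comparison is lexicographic = toLex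
def solveAltPairs (coins : List Int) : List (Int × Int) :=
  PySem.List.sorted ((PySem.List.enumerate coins).map (fun p => (p.2, p.1)))
    (fun p => (toLex p : Int ×ₗ Int))

-- `for v, i in reversed(pairs): …`
def solveAltLoop (change : Int) :
    List (Int × Int) → List Int → Int → Option (List Int)
  | [], _, _ => none
  | (v, i) :: rest, taken, total =>
    if total + v ≤ change then
      if total + v = change then some (PySem.List.sorted (taken ++ [i + 1]) (fun x => x))
      else solveAltLoop change rest (taken ++ [i + 1]) (total + v)
    else
      if total = change then some (PySem.List.sorted taken (fun x => x))
      else solveAltLoop change rest taken total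

def solve_alt (coins : List Int) (change : Int) : Option (List Int) :=
  solveAltLoop change (solveAltPairs coins).reverse [] 0

-- ===== PRECONDITION & SPEC =====
def Spec_solve (coins : List Int) (change : Int) (out : Option (List Int)) : Prop := out = solve_alt coins change
instance (coins : List Int) (change : Int) (out : Option (List Int)) : Decidable (Spec_solve coins change out) := by unfold Spec_solve; infer_instance

-- ===== CLAIM (what is proved, stated in full; the proofs are below) =====
def Claim_equal_solve : Prop := ∀ (coins : List Int) (change : Int), Dom_solve coins change → Spec_solve coins change (solve coins change)

-- ===== LEMMAS AND PROOFS =====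

-- strict "comes earlier" order of B's reversed pair list: value desc, index desc within a value
def pairGT (a b : Int × Int) : Prop := b.1 < a.1 ∨ (b.1 = a.1 ∧ b.2 < a.2)

-- the reversed sorted pair list, as the proofs see it
def pairsRev (coins : List Int) : List (Int × Int) := (solveAltPairs coins).reverse

lemma mem_pairsRev (coins : List Int) (q : Int × Int) :
    q ∈ pairsRev coins ↔ ∃ k : Nat, k < coins.length ∧ q = (coins.getD k 0, (k : Int)) := by
  unfold pairsRev solveAltPairs
  rw [List.mem_reverse, PySem.List.mem_sorted, List.mem_map]
  constructor
  · rintro ⟨p, hp, rfl⟩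
    rcases (PySem.List.mem_enumerate_iff _ _ _).1 hp with ⟨k, hk, rfl⟩
    exact ⟨k, hk, by simp [List.getElem?_eq_getElem, hk]⟩
  · rintro ⟨k, hk, rfl⟩
    refine ⟨((0 : Int) + (k : Int), coins[k]), ?_, ?_⟩
    · exact (PySem.List.mem_enumerate_iff _ _ _).2 ⟨k, hk, rfl⟩
    · simp [List.getElem?_eq_getElem, hk]

lemma pairsRev_perm (coins : List Int) :
    (pairsRev coins).Perm ((PySem.List.enumerate coins).map (fun p => (p.2, p.1))) :=
  (List.reverse_perm _).trans (PySem.List.sorted_perm _ _ _)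

lemma enumerate_swap_nodup (coins : List Int) :
    (((PySem.List.enumerate coins).map (fun p : Int × Int => (p.2, p.1)))).Nodup := by
  have h := PySem.List.pairwise_lt_enumerate (xs := coins) (s := 0)
  have hnd : (PySem.List.enumerate coins (0 : Int)).Nodup :=
    h.imp (fun {a b} hlt => by intro heq; rw [heq] at hlt; exact lt_irrefl _ hlt)
  exact hnd.map (fun a b hab => by
    cases a; cases b; simpa [Prod.ext_iff, and_comm] using hab)

lemma pairsRev_pairwise (coins : List Int) : (pairsRev coins).Pairwise pairGT := by
  have h1 : (solveAltPairs coins).Pairwise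
      (fun a b => (toLex a : Int ×ₗ Int) ≤ toLex b) := by
    exact PySem.List.sorted_pairwise _ _
  have hnd : (solveAltPairs coins).Nodup := by
    have := pairsRev_perm coins
    unfold pairsRev at this
    exact ((List.reverse_perm _).symm.trans this).nodup_iff.2 (enumerate_swap_nodup coins)
  have h2 := h1.and hnd
  have h3 : (solveAltPairs coins).Pairwise (fun a b => pairGT b a) := by
    refine h2.imp ?_
    rintro a b ⟨hle, hne⟩
    have hlt : (toLex a : Int ×ₗ Int) < toLex b :=
      lt_of_le_of_ne hle (fun h => hne (toLex.injective h))
    have hlt' := Prod.Lex.lt_iff.mp hlt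
    simp only [ofLex_toLex] at hlt'
    exact hlt'
  unfold pairsRev
  exact (List.pairwise_reverse).2 h3

lemma pairsRev_nodup_snd (coins : List Int) : ((pairsRev coins).map Prod.snd).Nodup := by
  have hperm := (pairsRev_perm coins).map Prod.snd
  refine hperm.nodup_iff.2 ?_
  rw [List.map_map]
  have h := PySem.List.pairwise_lt_enumerate (xs := coins) (s := 0)
  have : ((PySem.List.enumerate coins (0 : Int)).map
      (Prod.snd ∘ fun p : Int × Int => (p.2, p.1))).Pairwise (· < ·) := by
    rw [List.pairwise_map]
    exact h
  exact this.imp (fun hlt => ne_of_lt hlt)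

lemma sorted_rev_eq_map_fst (coins : List Int) :
    PySem.List.sorted coins (fun x => x) true = (pairsRev coins).map Prod.fst := by
  have hperm1 : (PySem.List.sorted coins (fun x => x) true).Perm coins :=
    PySem.List.sorted_perm _ _ _
  have hperm2 : ((pairsRev coins).map Prod.fst).Perm coins := by
    have h := (pairsRev_perm coins).map Prod.fst
    rw [List.map_map] at h
    have h2 : ((PySem.List.enumerate coins (0 : Int)).map
        (Prod.fst ∘ fun p : Int × Int => (p.2, p.1))) = coins := by
      have h3 := PySem.List.map_snd_enumerate (xs := coins) (s := (0 : Int))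
      exact h3
    rwa [h2] at h
  have hs1 : (PySem.List.sorted coins (fun x => x) true).Pairwise (fun a b : Int => b ≤ a) :=
    PySem.List.sorted_pairwise_rev _ _
  have hs2 : ((pairsRev coins).map Prod.fst).Pairwise (fun a b : Int => b ≤ a) := by
    rw [List.pairwise_map]
    refine (pairsRev_pairwise coins).imp ?_
    rintro a b (h | ⟨h1, h2⟩)
    · exact le_of_lt h
    · exact le_of_eq h1
  exact (hperm1.trans hperm2.symm).eq_of_pairwise (fun a b _ _ h1 h2 => le_antisymm h2 h1) hs1 hs2

-- in a pairGT-sorted list split at p, any member strictly greater than p sits in the prefix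
lemma mem_before {P l1 l2 : List (Int × Int)} {p q : Int × Int}
    (hsort : P.Pairwise pairGT) (hsplit : P = l1 ++ p :: l2)
    (hq : q ∈ P) (hgt : pairGT q p) : q ∈ l1 := by
  subst hsplit
  rcases List.mem_append.1 hq with h1 | h2
  · exact h1
  · rcases List.mem_cons.1 h2 with rfl | h3
    · exfalso; simp only [pairGT] at hgt; omega
    · exfalso
      have hpq : pairGT p q :=
        (List.pairwise_cons.1 (List.pairwise_append.1 hsort).2.1).1 q h3
      simp only [pairGT] at hgt hpq
      omega

-- from the split, every element of the prefix is pairGT the split point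
lemma pre_gt {coins : List Int} {pre rest : List (Int × Int)} {p : Int × Int}
    (hsplit : pairsRev coins = pre ++ p :: rest) :
    ∀ q ∈ pre, pairGT q p := by
  have h := pairsRev_pairwise coins
  rw [hsplit] at h
  intro q hq
  exact (List.pairwise_append.1 h).2.2 q hq p (List.mem_cons_self)

-- no coin of value v' sits at a position above i' once the walk has reached a pair of a
-- DIFFERENT value v: all earlier pairs have value > v'
lemma no_later_index {coins : List Int} {pre rest'' : List (Int × Int)} {v i v' i' : Int}
    (hsplit : pairsRev coins = pre ++ (v, i) :: (v', i') :: rest'') (hvv : v' ≠ v)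
    (j : Nat) (hj : j < coins.length) (hcj : coins.getD j 0 = v') (hij : i' < (j : Int)) :
    False := by
  have hq : (v', (j : Int)) ∈ pairsRev coins :=
    (mem_pairsRev coins _).2 ⟨j, hj, by rw [hcj]⟩
  have hsplit2 : pairsRev coins = (pre ++ [(v, i)]) ++ (v', i') :: rest'' := by
    rw [hsplit]; simp
  have hgt : pairGT (v', (j : Int)) (v', i') := by dsimp only [pairGT]; omega
  have hmem := mem_before (pairsRev_pairwise coins) hsplit2 hq hgt
  have hadj : pairGT (v, i) (v', i') :=
    (List.pairwise_cons.1 (List.pairwise_append.1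
      (hsplit ▸ pairsRev_pairwise coins)).2.1).1 _ (List.mem_cons_self)
  dsimp only [pairGT] at hadj
  rcases List.mem_append.1 hmem with hpre | hself
  · have hgt2 := pre_gt hsplit _ hpre
    dsimp only [pairGT] at hgt2
    omega
  · simp only [List.mem_singleton, Prod.mk.injEq] at hself
    exact hvv hself.1

-- within one value group no position between the next pair's index and the current one is free
lemma no_middle_index {coins : List Int} {pre rest'' : List (Int × Int)} {v i i' : Int}
    (hsplit : pairsRev coins = pre ++ (v, i) :: (v, i') :: rest'')
    (j : Nat) (hj : j < coins.length) (hcj : coins.getD j 0 = v)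
    (hij : i' < (j : Int)) (hjlt : (j : Int) < i) : False := by
  have hq : (v, (j : Int)) ∈ pairsRev coins :=
    (mem_pairsRev coins _).2 ⟨j, hj, by rw [hcj]⟩
  have hsplit2 : pairsRev coins = (pre ++ [(v, i)]) ++ (v, i') :: rest'' := by
    rw [hsplit]; simp
  have hgt : pairGT (v, (j : Int)) (v, i') := by dsimp only [pairGT]; omega
  have hmem := mem_before (pairsRev_pairwise coins) hsplit2 hq hgt
  rcases List.mem_append.1 hmem with hpre | hself
  · have hgt2 := pre_gt hsplit _ hpre
    dsimp only [pairGT] at hgt2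
    omega
  · simp only [List.mem_singleton, Prod.mk.injEq] at hself
    omega

-- the scan returns the LAST matching unused index (generalized over the range bound)
lemma scan_aux (coins : List Int) (v : Int) (taken : List Int) (k : Nat) :
    ∀ (n : Nat) (init : Option Int), k < n →
      coins.getD k 0 = v → ((k : Int) + 1) ∉ taken →
      (∀ j : Nat, k < j → j < n → coins.getD j 0 = v → ((j : Int) + 1) ∈ taken) →
      (List.range n).foldl
        (fun index i =>
          if coins.getD i 0 = v ∧ ((i : Int) + 1) ∉ taken then some (i : Int) else index)
        init = some (k : Int) := by
  intro n
  induction n with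
  | zero => intro init h; omega
  | succ n ih =>
    intro init hk hv hfree hmax
    rw [List.range_succ, List.foldl_append]
    simp only [List.foldl_cons, List.foldl_nil]
    by_cases hcond : coins.getD n 0 = v ∧ ((n : Int) + 1) ∉ taken
    · have hkn : k = n := by
        by_contra hne
        exact hcond.2 (hmax n (by omega) (by omega) hcond.1)
      subst hkn
      rw [if_pos hcond]
    · have hkn : k ≠ n := fun h => hcond (h ▸ ⟨hv, hfree⟩)
      rw [if_neg hcond]
      exact ih init (by omega) hv hfree (fun j hj1 hj2 => hmax j hj1 (by omega))

lemma scan_eq_some (coins : List Int) (v : Int) (taken : List Int) (k : Nat)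
    (hk : k < coins.length) (hv : coins.getD k 0 = v) (hfree : ((k : Int) + 1) ∉ taken)
    (hmax : ∀ j : Nat, k < j → j < coins.length → coins.getD j 0 = v → ((j : Int) + 1) ∈ taken) :
    solveScan coins v taken = some (k : Int) := by
  unfold solveScan
  exact scan_aux coins v taken k coins.length none hk hv hfree hmax

-- main loop correspondence
lemma loop_main (coins : List Int) (change : Int) :
    ∀ (rem pre : List (Int × Int)) (taken : List Int) (total : Int),
      pairsRev coins = pre ++ rem →
      (∀ q ∈ rem, ((q.2 : Int) + 1) ∉ taken) →
      (∀ v i rest', rem = (v, i) :: rest' →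
        (∀ j : Nat, j < coins.length → coins.getD j 0 = v → i < (j : Int) → ((j : Int) + 1) ∈ taken)
          ∨ change < total + v) →
      solveLoop coins change (rem.map Prod.fst) taken total = solveAltLoop change rem taken total := by
  intro rem
  induction rem with
  | nil => intro pre taken total _ _ _; simp [solveLoop, solveAltLoop]
  | cons hd rest ih =>
    obtain ⟨v, i⟩ := hd
    intro pre taken total hsplit hA hE
    have hhd : (v, i) ∈ pairsRev coins := by rw [hsplit]; simp
    obtain ⟨k, hk, hpair⟩ := (mem_pairsRev coins _).1 hhd
    have hvk : coins.getD k 0 = v := by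
      have := congrArg Prod.fst hpair; simpa using this.symm
    have hik : i = (k : Int) := by
      have := congrArg Prod.snd hpair; simpa using this
    subst hik
    by_cases htake : total + v ≤ change
    · have hmax : ∀ j : Nat, k < j → j < coins.length → coins.getD j 0 = v →
          ((j : Int) + 1) ∈ taken := by
        rcases hE v (k : Int) rest rfl with hL | hR
        · intro j h1 h2 h3
          exact hL j h2 h3 (by exact_mod_cast h1)
        · omega
      have hfree : ((k : Int) + 1) ∉ taken := hA (v, (k : Int)) (List.mem_cons_self)
      have hscan : solveScan coins v taken = some (k : Int) :=
        scan_eq_some coins v taken k hk hvk hfree hmax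
      by_cases heq : total + v = change
      · simp [solveLoop, solveAltLoop, hscan, heq]
      · simp only [List.map_cons, solveLoop, solveAltLoop, hscan, if_pos htake, if_neg heq,
          Option.getD_some]
        apply ih (pre ++ [(v, (k : Int))]) (taken ++ [(k : Int) + 1]) (total + v)
        · rw [hsplit]; simp
        · intro q hq
          have h1 := hA q (List.mem_cons_of_mem _ hq)
          have hqk : q.2 ≠ (k : Int) := by
            have hnd := pairsRev_nodup_snd coins
            rw [hsplit] at hnd
            simp only [List.map_append, List.map_cons] at hnd
            have := (List.nodup_append.1 hnd).2.1
            rcases List.nodup_cons.1 this with ⟨hnotin, _⟩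
            intro heq2
            exact hnotin (heq2 ▸ List.mem_map_of_mem hq)
          simp only [List.mem_append, List.mem_singleton]
          rintro (h | h)
          · exact h1 h
          · exact hqk (by omega)
        · intro v' i' rest'' hrest
          subst hrest
          have hsplit' : pairsRev coins = pre ++ (v, (k : Int)) :: (v', i') :: rest'' := by
            simpa using hsplit
          by_cases hvv : v' = v
          · subst hvv
            left
            intro j hj hcj hij
            by_cases hcase : (k : Int) < (j : Int)
            · exact List.mem_append_left _ (hmax j (by exact_mod_cast hcase) hj hcj)
            · by_cases hji : (j : Int) = (k : Int)
              · simp [hji]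
              · exact (no_middle_index hsplit' j hj hcj hij (by omega)).elim
          · left
            intro j hj hcj hij
            exact (no_later_index hsplit' hvv j hj hcj hij).elim
    · by_cases heq : total = change
      · simp only [List.map_cons, solveLoop, solveAltLoop, if_neg htake, if_pos heq]
      · simp only [List.map_cons, solveLoop, solveAltLoop, if_neg htake, if_neg heq]
        apply ih (pre ++ [(v, (k : Int))]) taken total
        · rw [hsplit]; simp
        · exact fun q hq => hA q (List.mem_cons_of_mem _ hq)
        · intro v' i' rest'' hrest
          subst hrest
          have hsplit' : pairsRev coins = pre ++ (v, (k : Int)) :: (v', i') :: rest'' := by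
            simpa using hsplit
          by_cases hvv : v' = v
          · subst hvv
            right
            omega
          · left
            intro j hj hcj hij
            exact (no_later_index hsplit' hvv j hj hcj hij).elim

-- ===== VERDICT (by name: the statement is the Claim_ definition above) =====
theorem solve_spec : Claim_equal_solve := by
  intro coins change _
  unfold Spec_solve solve solve_alt
  rw [sorted_rev_eq_map_fst]
  exact loop_main coins change (pairsRev coins) [] [] 0 rfl (by simp)
    (by
      intro v i rest' hrem
      left
      intro j hj hcj hij
      exfalso
      have hq : (v, (j : Int)) ∈ pairsRev coins := (mem_pairsRev coins _).2 ⟨j, hj, by rw [hcj]⟩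
      have hsp : pairsRev coins = [] ++ (v, i) :: rest' := by simpa using hrem
      have hgt : pairGT (v, (j : Int)) (v, i) := by dsimp only [pairGT]; omega
      have := mem_before (pairsRev_pairwise coins) hsp hq hgt
      simp at this)
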